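-- pv_equiv track=rewrite | github.com/mohammedala/Blast- | BlastMohammedMohammedAladdin.py | finding_hits
-- ===== SOURCE A (Python) =====
-- def finding_hits(seqData, Lseeds):
--         hits = []
--         for i in range(len(seqData)):
--                 hits.append([])
--                 s =seqData[i]
--                 for j in range(len(Lseeds)):
--                         num = s.find(Lseeds[j])
--                         hits[i].append(num)
--         return hits
-- ===== SOURCE B (Python) =====
-- def finding_hits(seqData, Lseeds):
--     lengths = set(len(seed) for seed in Lseeds)
--
--     def row(s):
--         first = {}
--         for L in lengths:
--             for pos in range(len(s) - L + 1):
--                 first.setdefault(s[pos:pos + L], pos)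
--         return [first.get(seed, -1) for seed in Lseeds]
--
--     return [row(s) for s in seqData]
-- ===== Notes on version B (the rewrite author's own statement) =====
-- stated objective: faster
-- what changed: Instead of calling str.find for every (sequence, seed) pair, B makes one sliding-window pass per sequence per distinct seed length, recording each substring's first occurrence in a dict, then answers every seed by an O(1) lookup.
import Mathlib
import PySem

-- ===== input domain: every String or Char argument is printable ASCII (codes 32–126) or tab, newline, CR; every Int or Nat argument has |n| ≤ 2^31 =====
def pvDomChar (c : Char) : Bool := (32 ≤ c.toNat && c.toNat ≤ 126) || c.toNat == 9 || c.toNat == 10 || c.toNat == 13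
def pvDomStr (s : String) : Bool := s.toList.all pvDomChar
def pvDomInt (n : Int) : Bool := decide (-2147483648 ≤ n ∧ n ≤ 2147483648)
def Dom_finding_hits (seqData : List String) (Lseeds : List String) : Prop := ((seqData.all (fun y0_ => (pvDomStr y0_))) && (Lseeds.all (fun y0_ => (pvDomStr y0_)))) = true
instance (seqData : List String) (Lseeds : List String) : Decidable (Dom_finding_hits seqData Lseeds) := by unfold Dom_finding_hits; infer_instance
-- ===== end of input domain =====

-- B replaces the per-(sequence, seed) str.find scans by one sliding-window pass per sequence and
-- distinct seed length, recording each substring's first occurrence in a dict, then answers each seed by a lookup.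

-- ===== PORT A =====
-- for i in range(len(seqData)): hits.append([]); for j in range(len(Lseeds)): hits[i].append(s.find(Lseeds[j]))
def finding_hits (seqData : List String) (Lseeds : List String) : List (List Int) :=
  (List.range seqData.length).foldl
    (fun hits i =>
      let s := seqData.getD i ""
      let row := (List.range Lseeds.length).foldl
        (fun r j => r ++ [PySem.Str.find s (Lseeds.getD j "")]) ([] : List Int)
      hits ++ [row])
    []

-- ===== PORT B =====
-- inner position loop of Source B: for pos in range(len(s)-L+1): first.setdefault(s[pos:pos+L], pos)
-- (s[pos:pos+L] = (s.drop pos).take L exactly, by PySem.List.slice_natCast_add; Python's empty range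
--  for a negative bound len(s)-L+1 is exactly Nat subtraction's clamp to 0)
def pvScanLen (cs : List Char) (L : Nat) (d : PySem.Dict (List Char) Int) : PySem.Dict (List Char) Int :=
  (List.range (cs.length + 1 - L)).foldl
    (fun d pos => d.setdefault ((cs.drop pos).take L) (pos : Int)) d

-- row(s) of Source B
def pvRow (lengths : PySem.Set Nat) (Lseeds : List String) (s : String) : List Int :=
  let first := lengths.foldl (fun d L => pvScanLen s.toList L d) PySem.Dict.empty
  Lseeds.map (fun seed => first.getD seed.toList (-1))

-- lengths = set(len(seed) for seed in Lseeds); the dict is only looked up, so the result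
-- does not depend on the set's iteration order (that is what the proofs below establish)
def finding_hits_alt (seqData : List String) (Lseeds : List String) : List (List Int) :=
  let lengths := PySem.Set.ofList (Lseeds.map (fun seed => seed.toList.length))
  seqData.map (pvRow lengths Lseeds)

-- ===== PRECONDITION & SPEC =====
def Spec_finding_hits (seqData : List String) (Lseeds : List String) (out : List (List Int)) : Prop := out = finding_hits_alt seqData Lseeds
instance (seqData : List String) (Lseeds : List String) (out : List (List Int)) : Decidable (Spec_finding_hits seqData Lseeds out) := by unfold Spec_finding_hits; infer_instance

-- ===== CLAIM (what is proved, stated in full; the proofs are below) =====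
def Claim_equal_finding_hits : Prop := ∀ (seqData : List String) (Lseeds : List String), Dom_finding_hits seqData Lseeds → Spec_finding_hits seqData Lseeds (finding_hits seqData Lseeds)

-- ===== LEMMAS AND PROOFS =====

-- the first position at which w occurs in cs, over exactly the start positions a length-|w| window can take
def pvOcc (cs w : List Char) : Option Nat :=
  (List.range (cs.length + 1 - w.length)).find? (fun p => w.isPrefixOf (cs.drop p))

-- characterization of Python str.find's scan
theorem pv_find_go_eq (sub : List Char) : ∀ (l : List Char) (k : Nat),
    PySem.Chars.find.go sub l k =
      match (List.range (l.length + 1 - sub.length)).find? (fun j => sub.isPrefixOf (l.drop j)) with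
      | some j => ((k + j : Nat) : Int)
      | none => -1 := by
  intro l
  induction l with
  | nil =>
    intro k
    by_cases h : sub = []
    · subst h; simp [PySem.Chars.find.go, List.range_succ_eq_map]
    · have : sub.length ≠ 0 := by simpa using h
      have h1 : 1 - sub.length = 0 := by omega
      simp [PySem.Chars.find.go, h, h1, List.isEmpty_iff]
  | cons c t ih =>
    intro k
    by_cases hp : sub.isPrefixOf (c :: t)
    · have hlen : sub.length ≤ t.length + 1 :=
        (List.isPrefixOf_iff_prefix.mp hp).length_le
      have hn : (c :: t).length + 1 - sub.length = (t.length + 1 - sub.length) + 1 := by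
        simp; omega
      rw [hn, List.range_succ_eq_map]
      simp [PySem.Chars.find.go, hp]
    · rw [show PySem.Chars.find.go sub (c :: t) k = PySem.Chars.find.go sub t (k + 1) by
        simp [PySem.Chars.find.go, hp]]
      by_cases hlen : sub.length ≤ t.length + 1
      · have hn : (c :: t).length + 1 - sub.length = (t.length + 1 - sub.length) + 1 := by
          simp; omega
        rw [hn, List.range_succ_eq_map, ih (k + 1)]
        simp only [List.find?_cons, List.drop_zero, hp, List.find?_map]
        have : (fun j => sub.isPrefixOf ((c :: t).drop j)) ∘ Nat.succ
            = (fun j => sub.isPrefixOf (t.drop j)) := by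
          funext j; simp
        rw [this]
        cases (List.range (t.length + 1 - sub.length)).find? (fun j => sub.isPrefixOf (t.drop j)) with
        | none => simp
        | some j => simp only [Option.map_some, Nat.succ_eq_add_one]; push_cast; ring
      · have h0' : t.length + 1 - sub.length = 0 := by omega
        have h0'' : t.length + 1 + 1 - sub.length = 0 := by omega
        rw [ih (k + 1)]
        simp [h0'', h0']

theorem pv_find_eq_occ (cs w : List Char) :
    PySem.Chars.find cs w = match pvOcc cs w with | some p => (p : Int) | none => -1 := by
  have := pv_find_go_eq w cs 0
  simp only [PySem.Chars.find, this, pvOcc]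
  cases (List.range (cs.length + 1 - w.length)).find? (fun p => w.isPrefixOf (cs.drop p)) <;> simp

theorem pv_find?_congr {α : Type} (p q : α → Bool) (xs : List α) (h : ∀ x ∈ xs, p x = q x) :
    xs.find? p = xs.find? q := by
  induction xs with
  | nil => rfl
  | cons x xs ih =>
    simp only [List.find?_cons, h x List.mem_cons_self]
    cases q x
    · exact ih (fun y hy => h y (List.mem_cons_of_mem _ hy))
    · rfl

theorem pv_prefix_beq (w x : List Char) :
    (w.isPrefixOf x) = (x.take w.length == w) := by
  rw [Bool.eq_iff_iff, List.isPrefixOf_iff_prefix, beq_iff_eq, List.prefix_iff_eq_take]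
  exact eq_comm

theorem pv_setdefault_get?_ne (d : PySem.Dict (List Char) Int) (k w : List Char) (v : Int)
    (h : w ≠ k) : (d.setdefault k v).get? w = d.get? w := by
  by_cases hc : d.contains k
  · rw [PySem.Dict.setdefault_of_contains d v hc]
  · rw [PySem.Dict.setdefault_of_not_contains d v (by simpa using hc)]
    exact PySem.Dict.get?_insert_of_ne d v h

-- scanning a length L ≠ |w| never touches key w
theorem pv_scan_go_ne (cs w : List Char) (L : Nat) (hL : w.length ≠ L) :
    ∀ (ps : List Nat), (∀ p ∈ ps, p + L ≤ cs.length) →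
      ∀ d : PySem.Dict (List Char) Int,
      (ps.foldl (fun d pos => d.setdefault ((cs.drop pos).take L) (pos : Int)) d).get? w = d.get? w := by
  intro ps
  induction ps with
  | nil => intro _ d; rfl
  | cons p ps ih =>
    intro hmem d
    simp only [List.foldl_cons]
    rw [ih (fun q hq => hmem q (List.mem_cons_of_mem _ hq))]
    apply pv_setdefault_get?_ne
    intro hw
    have hb := hmem p List.mem_cons_self
    have hlen : ((cs.drop p).take L).length = L := by simp; omega
    rw [← hw] at hlen; exact hL hlen

theorem pv_scan_other (cs w : List Char) (L : Nat) (hL : w.length ≠ L)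
    (d : PySem.Dict (List Char) Int) : (pvScanLen cs L d).get? w = d.get? w := by
  apply pv_scan_go_ne cs w L hL
  intro p hp; have := List.mem_range.mp hp; omega

-- scanning length |w|: the lookup becomes "old value, else first matching position"
theorem pv_scan_go_same (cs w : List Char) :
    ∀ (ps : List Nat) (d : PySem.Dict (List Char) Int),
      (ps.foldl (fun d pos => d.setdefault ((cs.drop pos).take w.length) (pos : Int)) d).get? w =
        (d.get? w).or ((ps.find? (fun p => ((cs.drop p).take w.length == w))).map (fun p => (p : Int))) := by
  intro ps
  induction ps with
  | nil => intro d; simp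
  | cons p ps ih =>
    intro d
    simp only [List.foldl_cons, List.find?_cons]
    by_cases hk : (cs.drop p).take w.length = w
    · have hb : ((cs.drop p).take w.length == w) = true := by simpa using hk
      rw [hb]
      cases hg : d.get? w with
      | some v =>
        have hc : d.contains ((cs.drop p).take w.length) = true := by
          rw [hk, PySem.Dict.contains_eq_isSome_get?, hg]; rfl
        rw [PySem.Dict.setdefault_of_contains d _ hc, ih d, hg]
        simp
      | none =>
        have hc : d.contains ((cs.drop p).take w.length) = false := by
          rw [hk, PySem.Dict.contains_eq_isSome_get?, hg]; rfl
        rw [PySem.Dict.setdefault_of_not_contains d _ hc, ih, hk,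
          PySem.Dict.get?_insert_self]
        simp
    · have hb : ((cs.drop p).take w.length == w) = false := by simpa using hk
      rw [hb, ih]
      rw [pv_setdefault_get?_ne d _ w _ (fun h => hk h.symm)]

theorem pv_scan_same (cs w : List Char) (d : PySem.Dict (List Char) Int) :
    (pvScanLen cs w.length d).get? w =
      (d.get? w).or ((pvOcc cs w).map (fun p => (p : Int))) := by
  unfold pvScanLen pvOcc
  rw [pv_scan_go_same cs w _ d,
    pv_find?_congr _ _ _ (fun p _ => (pv_prefix_beq w (cs.drop p)))]

-- a present key is never overwritten by later scans
theorem pv_fold_pres (cs w : List Char) (Ls : List Nat) (v : Int) :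
    ∀ d : PySem.Dict (List Char) Int, d.get? w = some v →
      (Ls.foldl (fun d L => pvScanLen cs L d) d).get? w = some v := by
  induction Ls with
  | nil => intro d h; exact h
  | cons L Ls ih =>
    intro d h
    simp only [List.foldl_cons]
    apply ih
    by_cases hL : w.length = L
    · subst hL; rw [pv_scan_same, h]; rfl
    · rw [pv_scan_other cs w L hL d, h]

theorem pv_fold_none (cs w : List Char) (Ls : List Nat) (hocc : pvOcc cs w = none) :
    ∀ d : PySem.Dict (List Char) Int, d.get? w = none →
      (Ls.foldl (fun d L => pvScanLen cs L d) d).get? w = none := by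
  induction Ls with
  | nil => intro d h; exact h
  | cons L Ls ih =>
    intro d h
    simp only [List.foldl_cons]
    apply ih
    by_cases hL : w.length = L
    · subst hL; rw [pv_scan_same, h, hocc]; rfl
    · rw [pv_scan_other cs w L hL d, h]

theorem pv_fold_main (cs w : List Char) (Ls : List Nat) :
    ∀ d : PySem.Dict (List Char) Int, w.length ∈ Ls → d.get? w = none →
      (Ls.foldl (fun d L => pvScanLen cs L d) d).get? w =
        (pvOcc cs w).map (fun p => (p : Int)) := by
  induction Ls with
  | nil => intro d h; exact absurd h (List.not_mem_nil)
  | cons L Ls ih =>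
    intro d hmem h
    simp only [List.foldl_cons]
    by_cases hL : w.length = L
    · subst hL
      have hscan : (pvScanLen cs w.length d).get? w = (pvOcc cs w).map (fun p => (p : Int)) := by
        rw [pv_scan_same, h]; rfl
      cases hocc : pvOcc cs w with
      | some q =>
        simp only [hocc, Option.map_some] at hscan ⊢
        exact pv_fold_pres cs w Ls _ _ hscan
      | none =>
        simp only [hocc, Option.map_none] at hscan ⊢
        exact pv_fold_none cs w Ls hocc _ hscan
    · have hmem' : w.length ∈ Ls := by
        rcases List.mem_cons.mp hmem with h' | h'
        · exact absurd h' hL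
        · exact h'
      exact ih _ hmem' (by rw [pv_scan_other cs w L hL d, h])

-- per-sequence row agreement: B's dict lookup is exactly Python's s.find(seed)
theorem pv_row_eq (Lseeds : List String) (s : String) :
    pvRow (PySem.Set.ofList (Lseeds.map (fun seed => seed.toList.length))) Lseeds s =
      Lseeds.map (fun t => PySem.Str.find s t) := by
  unfold pvRow
  apply List.map_congr_left
  intro seed hseed
  have hmem : seed.toList.length ∈ PySem.Set.ofList (Lseeds.map (fun seed => seed.toList.length)) := by
    rw [PySem.Set.mem_ofList]
    exact List.mem_map.mpr ⟨seed, hseed, rfl⟩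
  rw [PySem.Dict.getD_eq_get?_getD,
    pv_fold_main s.toList seed.toList _ PySem.Dict.empty hmem (PySem.Dict.get?_empty _),
    show PySem.Str.find s seed = PySem.Chars.find s.toList seed.toList from rfl,
    pv_find_eq_occ]
  cases pvOcc s.toList seed.toList <;> rfl

theorem pv_map_getD_range {α β : Type} (xs : List α) (dflt : α) (f : α → β) :
    (List.range xs.length).map (fun j => f (xs.getD j dflt)) = xs.map f := by
  apply List.ext_getElem (by simp)
  intro i h1 h2
  simp [List.getD_eq_getElem?_getD, List.getElem?_eq_getElem (by simpa using h2)]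

-- ===== VERDICT (by name: the statement is the Claim_ definition above) =====
theorem finding_hits_spec : Claim_equal_finding_hits := by
  intro seqData Lseeds _
  unfold Spec_finding_hits finding_hits finding_hits_alt
  simp only [PySem.List.foldl_append_singleton_eq_map, List.nil_append]
  rw [pv_map_getD_range seqData "" (fun s => (List.range Lseeds.length).map
        (fun j => PySem.Str.find s (Lseeds.getD j "")))]
  apply List.map_congr_left
  intro s _
  rw [pv_map_getD_range Lseeds "" (fun t => PySem.Str.find s t), pv_row_eq]
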